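-- pv_equiv track=rewrite | github.com/chipnator/OpenReadingFrame-Counter | COM203-HW2-ChrisDale.py | countORFs
-- ===== SOURCE A (Python) =====
-- def isStop(inSequence):
--     #end is TGA TAA or TAG
--     if inSequence==["T","A","A"] or inSequence==["T","A","G"] or inSequence==["T","G","A"]:
--         return True
--     else:
--         return False
--
-- def countORFs(inSequence):
--     #start is ATG
--     #end is TGA TAA or TAG
--     outCount=0
--     for trip in range(len(inSequence)):
--         if trip%3==0 and inSequence[trip:trip+3]==["A","T","G"]:
--             counter=0
--             iterator=trip
--             while iterator<len(inSequence):
--                 if iterator%3==0 and counter>500 and isStop(inSequence[iterator:iterator+3]):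
--                     outCount+=1
--                 iterator+=1
--                 counter+=1
--     return outCount
-- ===== SOURCE B (Python) =====
-- def countORFs(inSequence):
--     # One forward pass: count, for each in-frame stop codon at p, the number of
--     # in-frame ATG starts at positions t <= p - 501, maintained incrementally.
--     n = len(inSequence)
--     total = 0
--     eligible = 0  # in-frame ATG starts at positions <= p - 501
--     for p in range(n):
--         q = p - 501
--         if q >= 0 and q % 3 == 0 and inSequence[q:q+3] == ["A", "T", "G"]:
--             eligible += 1
--         if p % 3 == 0 and inSequence[p:p+3] in (["T", "A", "A"], ["T", "A", "G"], ["T", "G", "A"]):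
--             total += eligible
--     return total
-- ===== Notes on version B (the rewrite author's own statement) =====
-- stated objective: alternative
-- what changed: Replaced the per-start inner rescan of the whole tail by a single forward pass that keeps a running count of in-frame ATG starts lying at least 501 positions behind and adds it at every in-frame stop codon.
import Mathlib
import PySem

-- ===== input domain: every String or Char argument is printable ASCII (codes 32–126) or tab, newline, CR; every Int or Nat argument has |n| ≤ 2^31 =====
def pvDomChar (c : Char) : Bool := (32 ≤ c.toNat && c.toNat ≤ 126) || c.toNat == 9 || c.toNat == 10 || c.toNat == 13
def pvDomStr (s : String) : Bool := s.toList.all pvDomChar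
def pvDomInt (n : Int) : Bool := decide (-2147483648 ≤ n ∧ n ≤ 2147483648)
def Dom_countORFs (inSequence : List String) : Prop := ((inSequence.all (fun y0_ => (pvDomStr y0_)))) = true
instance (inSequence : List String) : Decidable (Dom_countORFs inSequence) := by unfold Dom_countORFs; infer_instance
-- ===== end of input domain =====

-- B replaces A's per-start rescan of the tail by one forward pass with a running
-- count of in-frame ATG starts at least 501 positions behind (objective: alternative).

-- ===== PORT A =====
def isStopA (s : List String) : Bool :=
  s == ["T", "A", "A"] || s == ["T", "A", "G"] || s == ["T", "G", "A"]

-- the 'while iterator < len(inSequence)' loop of A, with its three mutated locals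
def innerA (seq : List String) (len iterator counter outCount : Int) : Int :=
  if h : iterator < len then
    innerA seq len (iterator + 1) (counter + 1)
      (if PySem.Int.mod iterator 3 == 0 && decide (counter > 500) &&
          isStopA (PySem.List.slice seq (some iterator) (some (iterator + 3)))
       then outCount + 1 else outCount)
  else outCount
termination_by (len - iterator).toNat
decreasing_by omega

def countORFs (inSequence : List String) : Int :=
  (PySem.List.pyRange 0 (inSequence.length : Int)).foldl
    (fun outCount trip =>
      if PySem.Int.mod trip 3 == 0 &&
         PySem.List.slice inSequence (some trip) (some (trip + 3)) == ["A", "T", "G"] then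
        innerA inSequence (inSequence.length : Int) trip 0 outCount
      else outCount) 0

-- ===== PORT B =====
def isStopB (s : List String) : Bool :=
  s == ["T", "A", "A"] || s == ["T", "A", "G"] || s == ["T", "G", "A"]

def countORFs_alt (inSequence : List String) : Int :=
  ((PySem.List.pyRange 0 (inSequence.length : Int)).foldl
    (fun (st : Int × Int) p =>
      let q := p - 501
      let eligible :=
        if decide (q ≥ 0) && PySem.Int.mod q 3 == 0 &&
           PySem.List.slice inSequence (some q) (some (q + 3)) == ["A", "T", "G"]
        then st.2 + 1 else st.2
      let total :=
        if PySem.Int.mod p 3 == 0 &&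
           isStopB (PySem.List.slice inSequence (some p) (some (p + 3)))
        then st.1 + eligible else st.1
      (total, eligible)) ((0 : Int), (0 : Int))).1

-- ===== PRECONDITION & SPEC =====
def Spec_countORFs (inSequence : List String) (out : Int) : Prop := out = countORFs_alt inSequence
instance (inSequence : List String) (out : Int) : Decidable (Spec_countORFs inSequence out) := by unfold Spec_countORFs; infer_instance

-- ===== CLAIM (what is proved, stated in full; the proofs are below) =====
def Claim_equal_countORFs : Prop := ∀ (inSequence : List String), Dom_countORFs inSequence → Spec_countORFs inSequence (countORFs inSequence)

-- ===== LEMMAS AND PROOFS =====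

-- 'position t holds an in-frame ATG' / 'position p holds an in-frame stop codon'
def sB (seq : List String) (t : Nat) : Bool :=
  PySem.Int.mod (t : Int) 3 == 0 &&
  PySem.List.slice seq (some (t : Int)) (some ((t : Int) + 3)) == ["A", "T", "G"]

def eBp (seq : List String) (p : Nat) : Bool :=
  PySem.Int.mod (p : Int) 3 == 0 &&
  isStopA (PySem.List.slice seq (some (p : Int)) (some ((p : Int) + 3)))

-- the pair (t, p) is counted: start at t, stop at p, separated by more than 500
def gP (seq : List String) (t p : Nat) : Int :=
  if sB seq t = true ∧ eBp seq p = true ∧ t + 501 ≤ p then 1 else 0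

lemma isStopB_eq : isStopB = isStopA := rfl

lemma innerA_eq (seq : List String) (n : Nat) :
    ∀ (k j : Nat) (c oc : Int), j + k = n →
    innerA seq (n : Int) (j : Int) c oc =
      oc + ∑ p ∈ Finset.Ico j n,
        (if eBp seq p = true ∧ 500 < c + ((p : Int) - (j : Int)) then (1 : Int) else 0) := by
  intro k
  induction k with
  | zero =>
    intro j c oc hjk
    rw [innerA]
    have h1 : ¬ ((j : Int) < (n : Int)) := by omega
    have h2 : Finset.Ico j n = ∅ := by
      apply Finset.Ico_eq_empty; omega
    simp [h1, h2]
  | succ k ih =>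
    intro j c oc hjk
    rw [innerA]
    have hlt : (j : Int) < (n : Int) := by omega
    rw [dif_pos hlt]
    have hc : ((j : Int) + 1) = (((j + 1 : Nat)) : Int) := by push_cast; ring
    rw [hc, ih (j + 1) (c + 1) _ (by omega)]
    have htail : ∀ p : Nat,
        (if eBp seq p = true ∧ 500 < (c + 1) + ((p : Int) - ((j + 1 : Nat) : Int)) then (1 : Int) else 0)
      = (if eBp seq p = true ∧ 500 < c + ((p : Int) - (j : Int)) then (1 : Int) else 0) := by
      intro p
      have : (c + 1) + ((p : Int) - ((j + 1 : Nat) : Int)) = c + ((p : Int) - (j : Int)) := by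
        push_cast; ring
      rw [this]
    rw [Finset.sum_congr rfl (fun p _ => htail p)]
    rw [Finset.sum_eq_sum_Ico_succ_bot (by omega : j < n)]
    have hcond :
        (PySem.Int.mod (j : Int) 3 == 0 && decide (c > 500) &&
          isStopA (PySem.List.slice seq (some (j : Int)) (some ((j : Int) + 3)))) = true
      ↔ (eBp seq j = true ∧ 500 < c + ((j : Int) - (j : Int))) := by
      simp only [eBp, Bool.and_eq_true, decide_eq_true_eq]
      constructor
      · rintro ⟨⟨h1, h2⟩, h3⟩; exact ⟨⟨h1, h3⟩, by omega⟩
      · rintro ⟨⟨h1, h3⟩, h2⟩; exact ⟨⟨h1, by omega⟩, h3⟩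
    by_cases hb : (PySem.Int.mod (j : Int) 3 == 0 && decide (c > 500) &&
        isStopA (PySem.List.slice seq (some (j : Int)) (some ((j : Int) + 3)))) = true
    · rw [if_pos hb, if_pos (hcond.mp hb)]; ring
    · rw [if_neg hb, if_neg (fun h => hb (hcond.mpr h))]; ring

lemma stepA_eq (seq : List String) (t : Nat) (ht : t < seq.length) (oc : Int) :
    (if sB seq t then innerA seq (seq.length : Int) (t : Int) 0 oc else oc)
      = oc + ∑ p ∈ Finset.range seq.length, gP seq t p := by
  by_cases hs : sB seq t = true
  · rw [if_pos hs, innerA_eq seq seq.length (seq.length - t) t 0 oc (by omega)]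
    congr 1
    have hsplit : Finset.range seq.length = Finset.Ico 0 seq.length := by
      rw [Finset.range_eq_Ico]
    rw [hsplit, ← Finset.sum_Ico_consecutive _ (Nat.zero_le t) (le_of_lt ht)]
    have hlow : ∑ p ∈ Finset.Ico 0 t, gP seq t p = 0 := by
      apply Finset.sum_eq_zero
      intro p hp
      rw [Finset.mem_Ico] at hp
      rw [gP, if_neg]
      rintro ⟨-, -, h⟩; omega
    rw [hlow, zero_add]
    apply Finset.sum_congr rfl
    intro p hp
    rw [gP]
    apply if_congr _ rfl rfl
    constructor
    · rintro ⟨h1, h2⟩; exact ⟨hs, h1, by omega⟩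
    · rintro ⟨-, h1, h2⟩; exact ⟨h1, by omega⟩
  · rw [if_neg hs]
    have : ∑ p ∈ Finset.range seq.length, gP seq t p = 0 := by
      apply Finset.sum_eq_zero
      intro p _
      rw [gP, if_neg]; rintro ⟨h, -, -⟩; exact hs h
    rw [this, add_zero]

lemma countORFs_eq (seq : List String) :
    countORFs seq = ∑ t ∈ Finset.range seq.length, ∑ p ∈ Finset.range seq.length, gP seq t p := by
  unfold countORFs
  rw [PySem.List.pyRange_zero_nat, List.foldl_map]
  rw [PySem.List.foldl_congr_mem _ _
      (fun oc t => oc + ∑ p ∈ Finset.range seq.length, gP seq t p) 0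
      (by
        intro oc t htm
        rw [List.mem_range] at htm
        exact stepA_eq seq t htm oc)]
  rw [PySem.List.foldl_add]
  rw [zero_add]
  rfl

-- B-side: values of the two accumulators after the first k loop iterations
def Eacc (seq : List String) (k : Nat) : Int :=
  ∑ q ∈ Finset.range (k - 501), (if sB seq q = true then (1 : Int) else 0)

def Tacc (seq : List String) (k : Nat) : Int :=
  ∑ p ∈ Finset.range k, (if eBp seq p = true then Eacc seq (p + 1) else 0)

set_option maxRecDepth 4000 in
lemma foldB_eq (seq : List String) (k : Nat) :
    (PySem.List.pyRange 0 (k : Int)).foldl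
      (fun (st : Int × Int) p =>
        let q := p - 501
        let eligible :=
          if decide (q ≥ 0) && PySem.Int.mod q 3 == 0 &&
             PySem.List.slice seq (some q) (some (q + 3)) == ["A", "T", "G"]
          then st.2 + 1 else st.2
        let total :=
          if PySem.Int.mod p 3 == 0 &&
             isStopB (PySem.List.slice seq (some p) (some (p + 3)))
          then st.1 + eligible else st.1
        (total, eligible)) ((0 : Int), (0 : Int))
    = (Tacc seq k, Eacc seq k) := by
  induction k with
  | zero =>
    have h1 : Tacc seq 0 = 0 := by rw [Tacc]; simp
    have h2 : Eacc seq 0 = 0 := by rw [Eacc]; simp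
    rw [h1, h2, Nat.cast_zero, PySem.List.pyRange_one_eq_nil (le_refl 0)]
    rfl
  | succ k ih =>
    have hk : ((k + 1 : Nat) : Int) = (k : Int) + 1 := by push_cast; ring
    rw [hk, PySem.List.pyRange_one_succ_right (by omega : (0 : Int) ≤ (k : Int)),
        List.foldl_append, ih]
    simp only [List.foldl_cons, List.foldl_nil]
    have helig :
        (if decide ((k : Int) - 501 ≥ 0) && PySem.Int.mod ((k : Int) - 501) 3 == 0 &&
            PySem.List.slice seq (some ((k : Int) - 501)) (some ((k : Int) - 501 + 3)) == ["A", "T", "G"]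
         then Eacc seq k + 1 else Eacc seq k) = Eacc seq (k + 1) := by
      by_cases h5 : 501 ≤ k
      · have hq : ((k : Int) - 501) = ((k - 501 : Nat) : Int) := by omega
        have hcond :
            (decide ((k : Int) - 501 ≥ 0) && PySem.Int.mod ((k : Int) - 501) 3 == 0 &&
              PySem.List.slice seq (some ((k : Int) - 501)) (some ((k : Int) - 501 + 3)) == ["A", "T", "G"])
          = sB seq (k - 501) := by
          rw [hq, sB]
          have : decide (((k - 501 : Nat) : Int) ≥ 0) = true := by simp
          rw [this, Bool.true_and]
        rw [hcond, Eacc, Eacc]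
        have hr : (k + 1) - 501 = (k - 501) + 1 := by omega
        rw [hr, Finset.sum_range_succ]
        by_cases hs : sB seq (k - 501) = true
        · rw [if_pos hs, if_pos hs]
        · rw [if_neg hs, if_neg hs, add_zero]
      · have hcond : decide ((k : Int) - 501 ≥ 0) = false := by
          simp only [decide_eq_false_iff_not]; omega
        rw [hcond, Bool.false_and, Bool.false_and, if_neg (by simp)]
        rw [Eacc, Eacc]
        have : (k + 1) - 501 = k - 501 := by omega
        rw [this]
    rw [helig]
    have htot :
        (if PySem.Int.mod (k : Int) 3 == 0 &&
            isStopB (PySem.List.slice seq (some (k : Int)) (some ((k : Int) + 3)))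
         then Tacc seq k + Eacc seq (k + 1) else Tacc seq k) = Tacc seq (k + 1) := by
      rw [isStopB_eq]
      have hcond :
          (PySem.Int.mod (k : Int) 3 == 0 &&
            isStopA (PySem.List.slice seq (some (k : Int)) (some ((k : Int) + 3)))) = eBp seq k := rfl
      rw [hcond, Tacc, Tacc, Finset.sum_range_succ]
      by_cases hs : eBp seq k = true
      · rw [if_pos hs, if_pos hs]
      · rw [if_neg hs, if_neg hs, add_zero]
    rw [htot]

lemma countORFs_alt_eq (seq : List String) :
    countORFs_alt seq = ∑ p ∈ Finset.range seq.length, ∑ t ∈ Finset.range seq.length, gP seq t p := by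
  unfold countORFs_alt
  rw [foldB_eq seq seq.length]
  show Tacc seq seq.length = _
  rw [Tacc]
  apply Finset.sum_congr rfl
  intro p hp
  rw [Finset.mem_range] at hp
  by_cases he : eBp seq p = true
  · rw [if_pos he, Eacc]
    have h1 : ∑ q ∈ Finset.range ((p + 1) - 501), (if sB seq q = true then (1 : Int) else 0)
        = ∑ q ∈ Finset.range ((p + 1) - 501), gP seq q p := by
      apply Finset.sum_congr rfl
      intro q hq
      rw [Finset.mem_range] at hq
      rw [gP]
      apply if_congr _ rfl rfl
      constructor
      · intro h; exact ⟨h, he, by omega⟩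
      · rintro ⟨h, -, -⟩; exact h
    rw [h1]
    apply Finset.sum_subset
    · intro q hq
      rw [Finset.mem_range] at hq ⊢
      omega
    · intro q _ hq
      rw [Finset.mem_range] at hq
      rw [gP, if_neg]
      rintro ⟨-, -, h⟩; omega
  · rw [if_neg he]
    symm
    apply Finset.sum_eq_zero
    intro t _
    rw [gP, if_neg]
    rintro ⟨-, h, -⟩; exact he h

-- ===== VERDICT (by name: the statement is the Claim_ definition above) =====
theorem countORFs_spec : Claim_equal_countORFs := by
  intro seq _
  show countORFs seq = countORFs_alt seq
  rw [countORFs_eq, countORFs_alt_eq, Finset.sum_comm]
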